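-- pv_equiv track=rewrite | github.com/ETCBC/parallels | programs/parallels.py | condenseX
-- ===== SOURCE A (Python) =====
-- def condenseX(vlabels):
--     cnd = []
--     (cur_b, cur_c) = (None, None)
--     for (b, c, v, d) in vlabels:
--         sep = (
--             ""
--             if cur_b is None
--             else ". "
--             if cur_b != b
--             else "; "
--             if cur_c != c
--             else ", "
--         )
--         show_b = b + " " if cur_b != b else ""
--         show_c = str(c) + ":" if cur_b != b or cur_c != c else ""
--         (cur_b, cur_c) = (b, c)
--         cnd.append("{}[{}{}{}{}]".format(sep, show_b, show_c, v, d))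
--     return cnd
-- ===== SOURCE B (Python) =====
-- # B: two-level run-grouping decomposition (group by b, then by c) instead of A's
-- # stateful cur_b/cur_c tracking; same output, objective: alternative decomposition.
--
-- def _runs(items, key):
--     runs = []
--     for t in items:
--         k = key(t)
--         if runs and runs[-1][0] == k:
--             runs[-1][1].append(t)
--         else:
--             runs.append((k, [t]))
--     return runs
--
-- def _fmt(sep, show_b, show_c, v, d):
--     return "{}[{}{}{}{}]".format(sep, show_b, show_c, v, d)
--
-- def _emit_c(sep, show_b, cg):
--     (c, crun) = cg
--     (_, _, v, d) = crun[0]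
--     out = [_fmt(sep, show_b, str(c) + ":", v, d)]
--     for (_, _, v, d) in crun[1:]:
--         out.append(_fmt(", ", "", "", v, d))
--     return out
--
-- def _emit_b(bsep, bg):
--     (b, brun) = bg
--     cruns = _runs(brun, lambda t: t[1])
--     out = _emit_c(bsep, b + " ", cruns[0])
--     for cg in cruns[1:]:
--         out += _emit_c("; ", "", cg)
--     return out
--
-- def condenseX(vlabels):
--     bruns = _runs(vlabels, lambda t: t[0])
--     if not bruns:
--         return []
--     out = _emit_b("", bruns[0])
--     for bg in bruns[1:]:
--         out += _emit_b(". ", bg)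
--     return out
-- ===== Notes on version B (the rewrite author's own statement) =====
-- stated objective: alternative
-- what changed: B first splits the input into maximal runs grouped by b and, inside each, by c, then emits each group head with its headers and the rest with ', ', instead of A's single pass tracking cur_b/cur_c state.
import Mathlib
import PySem

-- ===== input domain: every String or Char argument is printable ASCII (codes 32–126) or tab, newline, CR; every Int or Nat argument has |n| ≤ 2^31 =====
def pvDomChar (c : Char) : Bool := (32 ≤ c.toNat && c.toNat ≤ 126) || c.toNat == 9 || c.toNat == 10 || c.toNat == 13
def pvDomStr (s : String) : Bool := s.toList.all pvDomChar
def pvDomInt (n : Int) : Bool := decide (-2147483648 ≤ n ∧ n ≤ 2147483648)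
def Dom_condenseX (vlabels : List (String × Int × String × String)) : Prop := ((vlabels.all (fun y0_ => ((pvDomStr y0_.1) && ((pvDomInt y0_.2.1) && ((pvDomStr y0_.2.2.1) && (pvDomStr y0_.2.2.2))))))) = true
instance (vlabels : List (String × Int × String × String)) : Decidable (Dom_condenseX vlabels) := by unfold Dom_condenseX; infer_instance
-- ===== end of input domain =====

-- B is a different decomposition of the same O(n) task (two-level run grouping vs stateful pass); no speed claim.

abbrev PvEnt : Type := String × Int × String × String

-- shared format string "{}[{}{}{}{}]" of both Pythons
def pvFmt (sep show_b show_c v d : String) : String :=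
  sep ++ "[" ++ show_b ++ show_c ++ v ++ d ++ "]"

-- ===== PORT A =====
def pvStepA (st : List String × Option String × Option Int) (e : PvEnt) :
    List String × Option String × Option Int :=
  let cnd := st.1
  let cur_b := st.2.1
  let cur_c := st.2.2
  let b := e.1
  let c := e.2.1
  let v := e.2.2.1
  let d := e.2.2.2
  let sep := if cur_b = none then "" else if cur_b ≠ some b then ". "
             else if cur_c ≠ some c then "; " else ", "
  let show_b := if cur_b ≠ some b then b ++ " " else ""
  let show_c := if cur_b ≠ some b ∨ cur_c ≠ some c then PySem.Int.toStr c ++ ":" else ""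
  (cnd ++ [pvFmt sep show_b show_c v d], some b, some c)

def condenseX (vlabels : List (String × Int × String × String)) : List String :=
  (vlabels.foldl pvStepA ([], none, none)).1

-- ===== PORT B =====
-- _runs: append t to the last run if its key matches, else start a new run
def pvRunsStep {K : Type} [DecidableEq K] (key : PvEnt → K)
    (runs : List (K × List PvEnt)) (t : PvEnt) : List (K × List PvEnt) :=
  match runs.getLast? with
  | some (k', g) => if k' = key t then runs.dropLast ++ [(k', g ++ [t])] else runs ++ [(key t, [t])]
  | none => [(key t, [t])]

def pvRuns {K : Type} [DecidableEq K] (key : PvEnt → K) (items : List PvEnt) :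
    List (K × List PvEnt) :=
  items.foldl (pvRunsStep key) []

-- shared "head group specially, remaining groups uniformly" shape of B's two loops
def pvEmitG {K : Type} (f h : K × List PvEnt → List String) :
    List (K × List PvEnt) → List String
  | [] => []
  | g :: rest => f g ++ rest.flatMap h

def pvEmitC (sep show_b : String) (cg : Int × List PvEnt) : List String :=
  match cg.2 with
  | [] => []  -- unreachable: every run produced by pvRuns is nonempty (Python indexes crun[0])
  | t :: rest =>
      pvFmt sep show_b (PySem.Int.toStr cg.1 ++ ":") t.2.2.1 t.2.2.2
        :: rest.map (fun t => pvFmt ", " "" "" t.2.2.1 t.2.2.2)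

def pvEmitB (bsep : String) (bg : String × List PvEnt) : List String :=
  pvEmitG (pvEmitC bsep (bg.1 ++ " ")) (pvEmitC "; " "") (pvRuns (fun t => t.2.1) bg.2)

def condenseX_alt (vlabels : List (String × Int × String × String)) : List String :=
  pvEmitG (pvEmitB "") (pvEmitB ". ") (pvRuns (fun t => t.1) vlabels)

-- ===== PRECONDITION & SPEC =====
def Spec_condenseX (vlabels : List (String × Int × String × String)) (out : List String) : Prop := out = condenseX_alt vlabels
instance (vlabels : List (String × Int × String × String)) (out : List String) : Decidable (Spec_condenseX vlabels out) := by unfold Spec_condenseX; infer_instance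

-- ===== CLAIM (what is proved, stated in full; the proofs are below) =====
def Claim_equal_condenseX : Prop := ∀ (vlabels : List (String × Int × String × String)), Dom_condenseX vlabels → Spec_condenseX vlabels (condenseX vlabels)

-- ===== LEMMAS AND PROOFS =====

theorem pvRuns_snoc {K : Type} [DecidableEq K] (key : PvEnt → K) (l : List PvEnt) (t : PvEnt) :
    pvRuns key (l ++ [t]) = pvRunsStep key (pvRuns key l) t := by
  simp [pvRuns, List.foldl_append]

/-- Structure of `pvRuns` on a nonempty list: the last run carries the last element,
    whose key is the run's key. -/
theorem pvRuns_struct {K : Type} [DecidableEq K] (key : PvEnt → K) :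
    ∀ (l : List PvEnt) (t : PvEnt),
      ∃ gs g, pvRuns key (l ++ [t]) = gs ++ [(key t, g ++ [t])] := by
  intro l
  induction l using List.reverseRecOn with
  | nil => intro t; exact ⟨[], [], by simp [pvRuns, pvRunsStep]⟩
  | append_singleton l t0 ih =>
      intro t
      obtain ⟨gs, g, hg⟩ := ih t0
      rw [pvRuns_snoc, hg, pvRunsStep]
      by_cases hk : key t0 = key t
      · exact ⟨gs, g ++ [t0], by simp [hk]⟩
      · exact ⟨gs ++ [(key t0, g ++ [t0])], [], by simp [hk]⟩

theorem pvEmitG_append {K : Type} (f h : K × List PvEnt → List String)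
    (gs : List (K × List PvEnt)) (g : K × List PvEnt) (hne : gs ≠ []) :
    pvEmitG f h (gs ++ [g]) = pvEmitG f h gs ++ h g := by
  cases gs with
  | nil => exact absurd rfl hne
  | cons g0 rest => simp [pvEmitG]

theorem pvEmitG_modlast {K : Type} (f h : K × List PvEnt → List String)
    (gs : List (K × List PvEnt)) (x y : K × List PvEnt) (E : List String)
    (hf : f y = f x ++ E) (hh : h y = h x ++ E) :
    pvEmitG f h (gs ++ [y]) = pvEmitG f h (gs ++ [x]) ++ E := by
  cases gs with
  | nil => simpa [pvEmitG] using hf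
  | cons g0 rest => simp [pvEmitG, hh]

theorem pvEmitB_snoc (bsep b : String) (g : List PvEnt) (t0 t : PvEnt) :
    pvEmitB bsep (b, (g ++ [t0]) ++ [t]) =
      pvEmitB bsep (b, g ++ [t0]) ++
        [if t0.2.1 = t.2.1 then pvFmt ", " "" "" t.2.2.1 t.2.2.2
         else pvFmt "; " "" (PySem.Int.toStr t.2.1 ++ ":") t.2.2.1 t.2.2.2] := by
  obtain ⟨gs, gc, hgc⟩ := pvRuns_struct (fun t => t.2.1) g t0
  unfold pvEmitB
  rw [pvRuns_snoc, hgc, pvRunsStep]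
  by_cases hc : t0.2.1 = t.2.1
  · simp only [hc, List.getLast?_concat]
    simp only [List.dropLast_concat]
    rw [show (gc ++ [t0]) ++ [t] = gc ++ (t0 :: [t]) by simp,
        show gc ++ [t0] = gc ++ (t0 :: []) by simp] at *
    cases gc with
    | nil =>
        apply pvEmitG_modlast <;> simp [pvEmitC]
    | cons c0 cs =>
        apply pvEmitG_modlast <;> simp [pvEmitC]
  · simp only [List.getLast?_concat, if_neg hc]
    rw [pvEmitG_append _ _ _ _ (by simp)]
    simp [pvEmitC]

theorem condenseX_alt_nil : condenseX_alt [] = [] := by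
  simp [condenseX_alt, pvRuns, pvEmitG]

/-- one item of A, as a function of the previous element -/
def pvItemA (prev : Option PvEnt) (t : PvEnt) : String :=
  match prev with
  | none => pvFmt "" (t.1 ++ " ") (PySem.Int.toStr t.2.1 ++ ":") t.2.2.1 t.2.2.2
  | some t0 =>
      if t0.1 = t.1 then
        if t0.2.1 = t.2.1 then pvFmt ", " "" "" t.2.2.1 t.2.2.2
        else pvFmt "; " "" (PySem.Int.toStr t.2.1 ++ ":") t.2.2.1 t.2.2.2
      else pvFmt ". " (t.1 ++ " ") (PySem.Int.toStr t.2.1 ++ ":") t.2.2.1 t.2.2.2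

theorem condenseX_alt_snoc : ∀ (l : List PvEnt) (t : PvEnt),
    condenseX_alt (l ++ [t]) = condenseX_alt l ++ [pvItemA l.getLast? t] := by
  intro l t
  cases hl : l.getLast? with
  | none =>
      rw [List.getLast?_eq_none_iff.mp hl]
      simp [condenseX_alt, pvRuns, pvRunsStep, pvEmitG, pvEmitB, pvEmitC, pvItemA]
  | some t0 =>
      obtain ⟨l', rfl⟩ : ∃ l', l = l' ++ [t0] := by
        rcases List.eq_nil_or_concat l with rfl | ⟨l', a, rfl⟩
        · simp at hl
        · simp at hl; exact ⟨l', by simp [hl]⟩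
      obtain ⟨gs, g, hg⟩ := pvRuns_struct (fun t => t.1) l' t0
      unfold condenseX_alt
      rw [pvRuns_snoc, hg, pvRunsStep]
      by_cases hb : t0.1 = t.1
      · simp only [List.getLast?_concat, if_pos hb, List.dropLast_concat]
        rw [pvEmitG_modlast _ _ gs ((t0.1 : String), g ++ [t0]) ((t0.1 : String), (g ++ [t0]) ++ [t])
              _ (pvEmitB_snoc _ _ g t0 t) (pvEmitB_snoc _ _ g t0 t)]
        simp [pvItemA, hb]
      · simp only [List.getLast?_concat, if_neg hb]
        rw [pvEmitG_append _ _ _ _ (by simp)]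
        simp [pvEmitB, pvRuns, pvRunsStep, pvEmitG, pvEmitC, pvItemA, hb]

/-- A's fold state is exactly (B's output, keys of the last element). -/
theorem pvStateA_eq : ∀ (l : List PvEnt),
    l.foldl pvStepA ([], none, none) =
      (condenseX_alt l,
       match l.getLast? with
       | none => ((none : Option String), (none : Option Int))
       | some t0 => (some t0.1, some t0.2.1)) := by
  intro l
  induction l using List.reverseRecOn with
  | nil => simp [condenseX_alt_nil]
  | append_singleton l t ih =>
      rw [List.foldl_append, List.foldl_cons, List.foldl_nil, ih, condenseX_alt_snoc]
      cases hl : l.getLast? with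
      | none =>
          simp only [List.getLast?_concat]
          simp [pvStepA, pvItemA]
      | some t0 =>
          simp only [List.getLast?_concat]
          by_cases hb : t0.1 = t.1
          · by_cases hc : t0.2.1 = t.2.1
            · simp [pvStepA, pvItemA, hb, hc]
            · simp [pvStepA, pvItemA, hb, hc]
          · simp [pvStepA, pvItemA, hb]

-- ===== VERDICT (by name: the statement is the Claim_ definition above) =====
theorem condenseX_spec : Claim_equal_condenseX := by
  intro vlabels _
  unfold Spec_condenseX condenseX
  rw [pvStateA_eq]
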